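-- pv_equiv track=rewrite | github.com/Vatnak/Spotify_Telegram_BOT | src/spotify.py | find_device_by_query
-- ===== SOURCE A (Python) =====
-- def find_device_by_query(devices: list, query: str) -> dict | None:
--     query_lower = query.lower().strip()
--     if not query_lower:
--         return None
--
--     for device in devices:
--         if device.get("id") == query:
--             return device
--
--     exact_matches = [d for d in devices if d.get("name", "").lower() == query_lower]
--     if exact_matches:
--         return exact_matches[0]
--
--     partial_matches = [d for d in devices if query_lower in d.get("name", "").lower()]
--     if len(partial_matches) == 1:
--         return partial_matches[0]
--
--     return None
-- ===== SOURCE B (Python) =====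
-- def find_device_by_query(devices: list, query: str) -> dict | None:
--     query_lower = query.lower().strip()
--     if not query_lower:
--         return None
--     first_id = first_exact = first_partial = None
--     partial_count = 0
--     for d in devices:
--         if first_id is None and d.get("id") == query:
--             first_id = d
--         name_lower = d.get("name", "").lower()
--         if first_exact is None and name_lower == query_lower:
--             first_exact = d
--         if query_lower in name_lower:
--             partial_count += 1
--             if first_partial is None:
--                 first_partial = d
--     if first_id is not None:
--         return first_id
--     if first_exact is not None:
--         return first_exact
--     if partial_count == 1:
--         return first_partial
--     return None
-- ===== Notes on version B (the rewrite author's own statement) =====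
-- stated objective: alternative
-- what changed: Replaces A's up-to-three sequential scans (id loop, exact-match list comprehension, partial-match list comprehension) with one single pass that maintains first id match, first exact match, and the partial-match count plus first partial match, then returns by priority.
import Mathlib
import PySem

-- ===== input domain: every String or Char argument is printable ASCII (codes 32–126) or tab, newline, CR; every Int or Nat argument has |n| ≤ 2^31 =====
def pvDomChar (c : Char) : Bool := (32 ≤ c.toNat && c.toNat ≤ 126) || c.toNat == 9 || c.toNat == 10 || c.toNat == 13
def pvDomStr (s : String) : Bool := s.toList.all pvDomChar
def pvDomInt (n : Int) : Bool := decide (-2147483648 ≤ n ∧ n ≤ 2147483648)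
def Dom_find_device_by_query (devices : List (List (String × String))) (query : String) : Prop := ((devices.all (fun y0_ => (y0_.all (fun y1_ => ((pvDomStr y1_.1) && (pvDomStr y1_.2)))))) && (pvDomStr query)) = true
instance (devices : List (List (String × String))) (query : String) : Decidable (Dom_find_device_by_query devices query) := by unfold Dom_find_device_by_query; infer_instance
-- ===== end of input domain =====

-- B does one pass instead of A's three sequential scans; same return value everywhere (A is total).

-- ===== PORT A =====
-- A: id loop (first device whose "id" equals raw query), then exact-name scan, then partial scan.
def find_device_by_query (devices : List (List (String × String))) (query : String) : Option (List (String × String)) :=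
  let query_lower := PySem.Str.strip (PySem.Str.lower query)
  if query_lower = "" then none
  else
    match devices.find? (fun d => PySem.Dict.get? (PySem.Dict.mk d) "id" == some query) with
    | some d => some d
    | none =>
      let exact_matches := devices.filter (fun d => PySem.Str.lower (PySem.Dict.getD (PySem.Dict.mk d) "name" "") == query_lower)
      match exact_matches with
      | d :: _ => some d
      | [] =>
        let partial_matches := devices.filter (fun d => PySem.Str.isIn query_lower (PySem.Str.lower (PySem.Dict.getD (PySem.Dict.mk d) "name" "")))
        if partial_matches.length = 1 then partial_matches.head? else none

-- ===== PORT B =====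
-- state: (first_id, first_exact, partial_count, first_partial)
def fdqStep (query ql : String)
    (st : Option (List (String × String)) × Option (List (String × String)) × Nat × Option (List (String × String)))
    (d : List (String × String)) :
    Option (List (String × String)) × Option (List (String × String)) × Nat × Option (List (String × String)) :=
  let (idm, exm, cnt, pf) := st
  let idm' := if idm.isNone && (PySem.Dict.get? (PySem.Dict.mk d) "id" == some query) then some d else idm
  let nl := PySem.Str.lower (PySem.Dict.getD (PySem.Dict.mk d) "name" "")
  let exm' := if exm.isNone && (nl == ql) then some d else exm
  if PySem.Str.isIn ql nl then
    (idm', exm', cnt + 1, if pf.isNone then some d else pf)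
  else
    (idm', exm', cnt, pf)

def find_device_by_query_alt (devices : List (List (String × String))) (query : String) : Option (List (String × String)) :=
  let query_lower := PySem.Str.strip (PySem.Str.lower query)
  if query_lower = "" then none
  else
    let (idm, exm, cnt, pf) := devices.foldl (fdqStep query query_lower) (none, none, 0, none)
    match idm with
    | some d => some d
    | none =>
      match exm with
      | some d => some d
      | none => if cnt = 1 then pf else none

-- ===== PRECONDITION & SPEC =====
def Spec_find_device_by_query (devices : List (List (String × String))) (query : String) (out : Option (List (String × String))) : Prop := out = find_device_by_query_alt devices query
instance (devices : List (List (String × String))) (query : String) (out : Option (List (String × String))) : Decidable (Spec_find_device_by_query devices query out) := by unfold Spec_find_device_by_query; infer_instance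

-- ===== CLAIM (what is proved, stated in full; the proofs are below) =====
def Claim_equal_find_device_by_query : Prop := ∀ (devices : List (List (String × String))) (query : String), Dom_find_device_by_query devices query → Spec_find_device_by_query devices query (find_device_by_query devices query)

-- ===== LEMMAS AND PROOFS =====

theorem head?_filter_eq_find? {α : Type} (p : α → Bool) (l : List α) :
    (l.filter p).head? = l.find? p := by
  induction l with
  | nil => rfl
  | cons x xs ih =>
    by_cases h : p x = true
    · simp [h]
    · simp only [Bool.not_eq_true] at h
      simp [h, ih]

theorem fdqStep_foldl (query ql : String) (devices : List (List (String × String)))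
    (idm exm pf : Option (List (String × String))) (cnt : Nat) :
    devices.foldl (fdqStep query ql) (idm, exm, cnt, pf) =
      (idm.or (devices.find? (fun d => PySem.Dict.get? (PySem.Dict.mk d) "id" == some query)),
       exm.or (devices.find? (fun d => PySem.Str.lower (PySem.Dict.getD (PySem.Dict.mk d) "name" "") == ql)),
       cnt + (devices.filter (fun d => PySem.Str.isIn ql (PySem.Str.lower (PySem.Dict.getD (PySem.Dict.mk d) "name" "")))).length,
       pf.or (devices.find? (fun d => PySem.Str.isIn ql (PySem.Str.lower (PySem.Dict.getD (PySem.Dict.mk d) "name" ""))))) := by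
  induction devices generalizing idm exm cnt pf with
  | nil => simp
  | cons d ds ih =>
    simp only [List.foldl_cons, fdqStep, List.find?_cons, List.filter_cons]
    cases idm <;> cases exm <;> cases pf <;>
      by_cases h1 : (PySem.Dict.get? (PySem.Dict.mk d) "id" == some query) = true <;>
      by_cases h2 : (PySem.Str.lower (PySem.Dict.getD (PySem.Dict.mk d) "name" "") == ql) = true <;>
      by_cases h3 : PySem.Chars.isIn ql.toList (PySem.Chars.lower (PySem.Dict.getD (PySem.Dict.mk d) "name" "").toList) = true <;>
      simp [h1, h2, h3, ih, Option.or, Nat.add_assoc, Nat.add_comm 1, PySem.Str.isIn_eq]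

-- ===== VERDICT (by name: the statement is the Claim_ definition above) =====
theorem find_device_by_query_spec : Claim_equal_find_device_by_query := by
  intro devices query _
  unfold Spec_find_device_by_query find_device_by_query find_device_by_query_alt
  simp only [fdqStep_foldl]
  by_cases hq : PySem.Str.strip (PySem.Str.lower query) = ""
  · simp [hq]
  · simp only [hq]
    cases hid : devices.find? (fun d => PySem.Dict.get? (PySem.Dict.mk d) "id" == some query) with
    | some d => simp
    | none =>
      simp only []
      rw [← head?_filter_eq_find?]
      cases hex : devices.filter (fun d => PySem.Str.lower (PySem.Dict.getD (PySem.Dict.mk d) "name" "") == PySem.Str.strip (PySem.Str.lower query)) with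
      | cons d ds => simp
      | nil =>
        simp only []
        rw [← head?_filter_eq_find?]
        cases hp : devices.filter (fun d => PySem.Str.isIn (PySem.Str.strip (PySem.Str.lower query)) (PySem.Str.lower (PySem.Dict.getD (PySem.Dict.mk d) "name" ""))) with
        | nil => simp
        | cons d ds =>
          by_cases hl : (d :: ds).length = 1 <;> simp [hl]
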